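-- pv_equiv track=rewrite | github.com/stephencrasch/customer_support_agent | student_store.py | _topic_norm_key
-- ===== SOURCE A (Python) =====
-- def _topic_norm_key(topic: str) -> str:
--     cleaned = " ".join(str(topic or "").replace("_", " ").replace("-", " ").split()).strip().lower()
--     if not cleaned:
--         return ""
--
--     stopwords = {
--         "concept",
--         "concepts",
--         "topic",
--         "topics",
--         "overview",
--         "intro",
--         "introduction",
--         "basics",
--         "basic",
--         "mechanism",
--         "mechanisms",
--     }
--     parts: list[str] = []
--     for token in cleaned.split():
--         part = "".join(ch for ch in token if ch.isalnum())
--         if not part: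
--             continue
--         if part.endswith("s") and len(part) > 3:
--             part = part[:-1]
--         if part in stopwords:
--             continue
--         parts.append(part)
--
--     if not parts:
--         parts = ["".join(ch for ch in token if ch.isalnum()) for token in cleaned.split()]
--         parts = [part for part in parts if part]
--
--     return "".join(parts)
-- ===== SOURCE B (Python) =====
-- STOPWORDS = frozenset({
--     "concept", "concepts", "topic", "topics", "overview", "intro",
--     "introduction", "basics", "basic", "mechanism", "mechanisms",
-- })
--
--
-- def _topic_norm_key(topic: str) -> str:
--     # One character-level scan builds the normalized words directly (no
--     # replace/join/split/strip string rewriting passes), then one pass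
--     # stems and drops stopwords; the unfiltered words are the fallback.
--     words = []
--     cur = []
--     for ch in str(topic or ""):
--         if ch == "_" or ch == "-" or ch.isspace():
--             if cur:
--                 words.append("".join(cur))
--                 cur = []
--         else:
--             c = ch.lower()
--             if c.isalnum():
--                 cur.append(c)
--     if cur:
--         words.append("".join(cur))
--     kept = []
--     for w in words:
--         s = w[:-1] if len(w) > 3 and w.endswith("s") else w
--         if s not in STOPWORDS:
--             kept.append(s)
--     return "".join(kept or words)
-- ===== Notes on version B (the rewrite author's own statement) =====
-- stated objective: alternative
-- what changed: A normalizes by whole-string rewriting passes (replace/_- to spaces, split, join, strip, lower, split again) and one token loop with a fallback recomputation; B is a single character-level state machine that tokenizes, lowercases and alnum-filters the original string in one scan, followed by one stem-and-stopword pass, with the scanned word list reused as the fallback.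
import Mathlib
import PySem

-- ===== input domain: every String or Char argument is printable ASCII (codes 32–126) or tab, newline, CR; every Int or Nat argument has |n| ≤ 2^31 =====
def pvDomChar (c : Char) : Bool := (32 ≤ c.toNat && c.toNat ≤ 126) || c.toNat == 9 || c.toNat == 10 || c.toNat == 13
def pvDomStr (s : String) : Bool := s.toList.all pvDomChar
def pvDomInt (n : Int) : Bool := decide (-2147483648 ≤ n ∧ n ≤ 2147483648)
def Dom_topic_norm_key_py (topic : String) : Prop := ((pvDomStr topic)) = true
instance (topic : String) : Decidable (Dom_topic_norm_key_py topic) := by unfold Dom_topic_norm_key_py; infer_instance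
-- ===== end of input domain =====

-- B replaces A's whole-string rewriting pipeline (replace '_'/'-', split, join, strip,
-- lower, split again, token loop with a fallback recomputation) by a single
-- character-level state machine that builds the word list in one scan, plus one
-- stem/stopword pass; the return values are proved equal on all inputs.

-- ===== PORT A =====
def pvStop : List (List Char) :=
  ["concept".toList, "concepts".toList, "topic".toList, "topics".toList, "overview".toList,
   "intro".toList, "introduction".toList, "basics".toList, "basic".toList,
   "mechanism".toList, "mechanisms".toList]

-- A's loop body (one iteration of A's for-loop, with the continue-skips as early returns)
def pvStepA (acc : List (List Char)) (token : List Char) : List (List Char) :=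
  let part := token.filter PySem.Chars.isalnum
  if part = [] then acc
  else
    let part := if PySem.Chars.endswith part ['s'] && decide (3 < part.length)
                then PySem.Chars.slice part none (some (-1)) else part
    if part ∈ pvStop then acc else acc ++ [part]

def topic_norm_key_py (topic : String) : String :=
  let cleaned := PySem.Chars.lower (PySem.Chars.strip (PySem.Chars.join [' ']
    (PySem.Chars.split₀ (PySem.Chars.replace (PySem.Chars.replace topic.toList ['_'] [' ']) ['-'] [' ']))))
  if cleaned = [] then "" else
    let parts : List (List Char) := (PySem.Chars.split₀ cleaned).foldl pvStepA []
    let parts := if parts = [] then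
        ((PySem.Chars.split₀ cleaned).map (fun token => token.filter PySem.Chars.isalnum)).filter
          (fun p => p ≠ [])
      else parts
    String.ofList (PySem.Chars.join [] parts)

-- ===== PORT B =====
-- B's scanner step: separators flush the current word, other characters are lowered and
-- kept only if alphanumeric.
def pvScanStep (st : List (List Char) × List Char) (ch : Char) : List (List Char) × List Char :=
  if ch = '_' ∨ ch = '-' ∨ PySem.Chars.isspace ch then
    if st.2 = [] then st else (st.1 ++ [st.2], [])
  else
    let c := PySem.Chars.lowerChar ch
    if PySem.Chars.isalnum c then (st.1, st.2 ++ [c]) else st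

-- B's second-pass step: stem a word and drop it if it is a stopword.
def pvKeptStep (kept : List (List Char)) (w : List Char) : List (List Char) :=
  let s := if decide (3 < w.length) && PySem.Chars.endswith w ['s']
           then PySem.Chars.slice w none (some (-1)) else w
  if s ∈ pvStop then kept else kept ++ [s]

def topic_norm_key_py_alt (topic : String) : String :=
  let st := topic.toList.foldl pvScanStep ([], [])
  let words := if st.2 = [] then st.1 else st.1 ++ [st.2]
  let kept := words.foldl pvKeptStep []
  String.ofList (PySem.Chars.join [] (if kept = [] then words else kept))

-- ===== PRECONDITION & SPEC =====
def Spec_topic_norm_key_py (topic : String) (out : String) : Prop := out = topic_norm_key_py_alt topic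
instance (topic : String) (out : String) : Decidable (Spec_topic_norm_key_py topic out) := by unfold Spec_topic_norm_key_py; infer_instance

-- ===== CLAIM (what is proved, stated in full; the proofs are below) =====
def Claim_equal_topic_norm_key_py : Prop := ∀ (topic : String), Dom_topic_norm_key_py topic → Spec_topic_norm_key_py topic (topic_norm_key_py topic)

-- ===== LEMMAS AND PROOFS =====
theorem pv_isspace_lowerChar (c : Char) :
    PySem.Chars.isspace (PySem.Chars.lowerChar c) = PySem.Chars.isspace c := by
  unfold PySem.Chars.lowerChar
  by_cases h : PySem.Chars.isupper c = true
  · simp only [h, if_pos]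
    unfold PySem.Chars.isupper at h
    simp only [Bool.and_eq_true, decide_eq_true_eq, Char.le_def] at h
    have hA : ('A'.val.toNat : Nat) ≤ c.val.toNat := UInt32.le_iff_toNat_le.mp h.1
    have hZ : c.val.toNat ≤ 'Z'.val.toNat := UInt32.le_iff_toNat_le.mp h.2
    rw [show 'A'.val.toNat = 65 by decide] at hA
    rw [show 'Z'.val.toNat = 90 by decide] at hZ
    have hA2 : 65 ≤ c.toNat := hA
    have hZ2 : c.toNat ≤ 90 := hZ
    have hv : (c.toNat + 32).isValidChar := by left; omega
    have ht : (Char.ofNat (c.toNat + 32)).toNat = c.toNat + 32 := by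
      rw [Char.toNat_ofNat, if_pos hv]
    unfold PySem.Chars.isspace
    rw [ht, Bool.eq_iff_iff]
    simp only [Bool.or_eq_true, Bool.and_eq_true, decide_eq_true_eq]
    omega
  · simp [h]

theorem pv_replace_go (a b : Char) (l : List Char) :
    ∀ (fuel : Nat) (acc : List Char), l.length ≤ fuel →
    PySem.Chars.replace.go [a] [b] fuel l acc
      = acc.reverse ++ l.map (fun c => if c = a then b else c) := by
  induction l with
  | nil =>
    intro fuel acc _
    cases fuel <;> simp [PySem.Chars.replace.go]
  | cons c t ih =>
    intro fuel acc hf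
    cases fuel with
    | zero => simp at hf
    | succ n =>
      rw [PySem.Chars.replace.go]
      by_cases hc : c = a
      · have hp : List.isPrefixOf [a] (c :: t) = true := by
          simp [List.isPrefixOf, hc]
        simp only [hp, if_pos, List.length_cons, List.length_nil, Nat.zero_add,
          List.drop_one, List.tail_cons, List.reverse_cons, List.reverse_nil, List.nil_append,
          List.singleton_append]
        rw [ih n (b :: acc) (by simpa using hf)]
        simp [hc]
      · have hp : List.isPrefixOf [a] (c :: t) = false := by
          simp [List.isPrefixOf]; exact fun h => (hc h.symm).elim
        simp only [hp, Bool.false_eq_true, if_false]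
        rw [ih n (c :: acc) (by simpa using hf)]
        simp [hc]

theorem pv_replace_single (s : List Char) (a b : Char) :
    PySem.Chars.replace s [a] [b] = s.map (fun c => if c = a then b else c) := by
  unfold PySem.Chars.replace
  rw [if_neg (by simp)]
  simpa using pv_replace_go a b s s.length [] (Nat.le_refl _)

def pvWords (p : Char → Bool) : List Char → List (List Char)
  | [] => []
  | c :: t =>
    if p c then pvWords p t
    else (c :: t.takeWhile (fun d => !p d)) :: pvWords p (t.dropWhile (fun d => !p d))
termination_by l => l.length
decreasing_by
  · simp
  · have := List.length_dropWhile_le (fun d => !p d) t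
    simp only [List.length_cons]
    omega

theorem pv_split_go (s : List Char) :
    ∀ (cur : List Char) (acc : List (List Char)),
    PySem.Chars.split₀.go s cur acc
      = acc.reverse ++ (if cur = [] then pvWords PySem.Chars.isspace s
          else (cur.reverse ++ s.takeWhile (fun d => !PySem.Chars.isspace d))
                :: pvWords PySem.Chars.isspace (s.dropWhile (fun d => !PySem.Chars.isspace d))) := by
  induction s with
  | nil =>
    intro cur acc
    by_cases h : cur = [] <;> simp [PySem.Chars.split₀.go, h, pvWords]
  | cons c t ih =>
    intro cur acc
    rw [PySem.Chars.split₀.go]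
    by_cases hs : PySem.Chars.isspace c = true
    · simp only [hs, if_pos]
      by_cases h : cur = []
      · simp only [h, List.isEmpty_nil, if_pos]
        rw [ih [] acc]
        simp [pvWords, hs]
      · rw [if_neg (by simpa using h)]
        rw [ih [] (cur.reverse :: acc)]
        simp [pvWords, hs, h]
    · simp only [hs, Bool.false_eq_true, if_false]
      rw [ih (c :: cur) acc]
      have : (c :: cur : List Char) ≠ [] := by simp
      rw [if_neg this]
      by_cases h : cur = [] <;>
        simp [pvWords, hs, h, List.takeWhile, List.dropWhile]

theorem pv_split₀_eq_words (s : List Char) :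
    PySem.Chars.split₀ s = pvWords PySem.Chars.isspace s := by
  unfold PySem.Chars.split₀
  rw [pv_split_go s [] []]
  simp

theorem pv_words_prop (p : Char → Bool) (l : List Char) :
    ∀ w ∈ pvWords p l, w ≠ [] ∧ ∀ c ∈ w, p c = false := by
  induction l using pvWords.induct p with
  | case1 => simp [pvWords]
  | case2 c t hc ih =>
    rw [pvWords, if_pos hc]; exact ih
  | case3 c t hc ih =>
    rw [pvWords, if_neg hc]
    intro w hw
    rcases List.mem_cons.mp hw with h | h
    · subst h
      refine ⟨by simp, ?_⟩
      intro d hd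
      rcases List.mem_cons.mp hd with h | h
      · subst h; simpa using hc
      · have := List.mem_takeWhile_imp h
        simpa using this
    · exact ih w h

def pvSep (c : Char) : Bool := (c == '_') || (c == '-') || PySem.Chars.isspace c

def pvSub (c : Char) : Char := if c = '_' ∨ c = '-' then ' ' else c

theorem pv_isspace_sub (c : Char) : PySem.Chars.isspace (pvSub c) = pvSep c := by
  unfold pvSub pvSep
  by_cases h : c = '_' ∨ c = '-'
  · rw [if_pos h]
    rcases h with h | h <;> subst h <;> decide
  · rw [if_neg h]
    rw [not_or] at h
    simp [h.1, h.2]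

theorem pv_sub_id (c : Char) (h : pvSep c = false) : pvSub c = c := by
  unfold pvSub
  rw [if_neg]
  unfold pvSep at h
  simp at h
  rintro (rfl | rfl) <;> simp at h

theorem pv_map_sub_id (l : List Char) (h : ∀ c ∈ l, pvSep c = false) : l.map pvSub = l := by
  rw [List.map_congr_left (fun c hc => pv_sub_id c (h c hc))]
  exact List.map_id l

theorem pv_pred_sub : ((fun d => !PySem.Chars.isspace d) ∘ pvSub) = (fun d => !pvSep d) :=
  funext fun d => by simp [Function.comp, pv_isspace_sub]

theorem pv_words_sub (l : List Char) :
    pvWords PySem.Chars.isspace (l.map pvSub) = pvWords pvSep l := by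
  induction l using pvWords.induct pvSep with
  | case1 => simp [pvWords]
  | case2 c t hc ih =>
    rw [List.map_cons, pvWords, if_pos (by rw [pv_isspace_sub]; exact hc),
        pvWords, if_pos hc]
    exact ih
  | case3 c t hc ih =>
    rw [List.map_cons, pvWords, if_neg (by rw [pv_isspace_sub]; exact hc),
        pvWords, if_neg hc]
    rw [List.takeWhile_map, List.dropWhile_map, pv_pred_sub,
        pv_sub_id c (by simpa using hc), ih,
        pv_map_sub_id _ (fun d hd => by simpa using List.mem_takeWhile_imp hd)]

theorem pv_lower_join (ws : List (List Char)) :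
    PySem.Chars.lower (PySem.Chars.join [' '] ws)
      = PySem.Chars.join [' '] (ws.map PySem.Chars.lower) := by
  induction ws with
  | nil => simp [PySem.Chars.join_nil, PySem.Chars.lower]
  | cons w rest ih =>
    cases rest with
    | nil => simp [PySem.Chars.join_singleton]
    | cons x r =>
      rw [PySem.Chars.join_cons_cons, List.map_cons,
          show (x :: r).map PySem.Chars.lower = PySem.Chars.lower x :: r.map PySem.Chars.lower from rfl,
          PySem.Chars.join_cons_cons,
          show (PySem.Chars.lower x :: r.map PySem.Chars.lower) = (x :: r).map PySem.Chars.lower from rfl,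
          ← ih]
      simp [PySem.Chars.lower]
      decide

-- join equation facts

theorem pv_head_join (w : List Char) (ws : List (List Char)) (c : Char) (w' : List Char)
    (hw : w = c :: w') :
    (PySem.Chars.join [' '] (w :: ws)).head? = some c := by
  cases ws with
  | nil => rw [PySem.Chars.join_singleton, hw]; rfl
  | cons x r => rw [PySem.Chars.join_cons_cons, hw]; rfl

theorem pv_join_ne_nil (x : List Char) (r : List (List Char)) (hx : x ≠ []) :
    PySem.Chars.join [' '] (x :: r) ≠ [] := by
  cases r with
  | nil => rw [PySem.Chars.join_singleton]; exact hx
  | cons y t => rw [PySem.Chars.join_cons_cons]; simp [hx]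

theorem pv_getLast_join (ws : List (List Char))
    (h : ∀ w ∈ ws, w ≠ [] ∧ ∀ c ∈ w, PySem.Chars.isspace c = false) :
    ∀ d, (PySem.Chars.join [' '] ws).getLast? = some d → PySem.Chars.isspace d = false := by
  induction ws with
  | nil => intro d hd; simp [PySem.Chars.join_nil] at hd
  | cons w rest ih =>
    cases rest with
    | nil =>
      intro d hd
      rw [PySem.Chars.join_singleton] at hd
      exact (h w (by simp)).2 d (List.mem_of_getLast? hd)
    | cons x r =>
      intro d hd
      rw [PySem.Chars.join_cons_cons] at hd
      have hne : PySem.Chars.join [' '] (x :: r) ≠ [] :=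
        pv_join_ne_nil x r (h x (by simp)).1
      rw [List.append_assoc,
          List.getLast?_append_of_ne_nil (l₁ := w) (by simp),
          List.getLast?_append_of_ne_nil (l₁ := [' ']) hne] at hd
      exact ih (fun w hw => h w (by simp [hw])) d hd

theorem pv_strip_join (ws : List (List Char))
    (h : ∀ w ∈ ws, w ≠ [] ∧ ∀ c ∈ w, PySem.Chars.isspace c = false) :
    PySem.Chars.strip (PySem.Chars.join [' '] ws) = PySem.Chars.join [' '] ws := by
  unfold PySem.Chars.strip PySem.Chars.lstrip PySem.Chars.rstrip
  set j := PySem.Chars.join [' '] ws with hj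
  have hstep : List.dropWhile PySem.Chars.isspace j = j := by
    cases ws with
    | nil => simp [hj, PySem.Chars.join_nil]
    | cons w rest =>
      obtain ⟨c, w', hw⟩ := List.exists_cons_of_ne_nil (h w (by simp)).1
      have hhd := pv_head_join w rest c w' hw
      rw [← hj] at hhd
      rcases hj2 : j with _ | ⟨a, t⟩
      · simp
      · rw [hj2] at hhd
        have hac : a = c := by simpa using hhd
        subst hac
        rw [List.dropWhile_cons_of_neg]
        simp [(h w (by simp)).2 a (by simp [hw])]
  rw [hstep]
  cases hrl : j.reverse with
  | nil =>
    rw [List.reverse_eq_nil_iff] at hrl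
    rw [hrl]
    simp
  | cons a t =>
    have hlast : j.getLast? = some a := by
      rw [← List.head?_reverse, hrl]; rfl
    rw [List.dropWhile_cons_of_neg (by simp [pv_getLast_join ws h a hlast])]
    rw [← hrl, List.reverse_reverse]

theorem pv_words_join (ws : List (List Char))
    (h : ∀ w ∈ ws, w ≠ [] ∧ ∀ c ∈ w, PySem.Chars.isspace c = false) :
    pvWords PySem.Chars.isspace (PySem.Chars.join [' '] ws) = ws := by
  induction ws with
  | nil => simp [PySem.Chars.join_nil, pvWords]
  | cons w rest ih =>
    obtain ⟨c, w', hw⟩ := List.exists_cons_of_ne_nil (h w (by simp)).1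
    have hcs : PySem.Chars.isspace c = false := (h w (by simp)).2 c (by simp [hw])
    have hw' : ∀ d ∈ w', PySem.Chars.isspace d = false :=
      fun d hd => (h w (by simp)).2 d (by simp [hw, hd])
    cases rest with
    | nil =>
      rw [PySem.Chars.join_singleton, hw, pvWords, if_neg (by simp [hcs])]
      rw [List.takeWhile_eq_self_iff.mpr (by intro d hd; simp [hw' d hd]),
          List.dropWhile_eq_nil_iff.mpr (by intro d hd; simp [hw' d hd])]
      simp [pvWords]
    | cons x r =>
      rw [PySem.Chars.join_cons_cons, hw, List.append_assoc, List.cons_append,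
          pvWords, if_neg (by simp [hcs])]
      have htw : List.takeWhile (fun d => !PySem.Chars.isspace d)
          (w' ++ ([' '] ++ PySem.Chars.join [' '] (x :: r))) = w' := by
        rw [List.takeWhile_append_of_pos (by intro d hd; simp [hw' d hd])]
        rw [List.singleton_append, List.takeWhile_cons_of_neg (by decide)]
        simp
      have hdw : List.dropWhile (fun d => !PySem.Chars.isspace d)
          (w' ++ ([' '] ++ PySem.Chars.join [' '] (x :: r)))
            = ' ' :: PySem.Chars.join [' '] (x :: r) := by
        rw [List.dropWhile_append_of_pos (by intro d hd; simp [hw' d hd])]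
        rw [List.singleton_append, List.dropWhile_cons_of_neg (by decide)]
      rw [htw, hdw, pvWords, if_pos (by decide)]
      
      rw [ih (fun y hy => h y (by simp [hy]))]

def pvg (w : List Char) : List Char := (w.map PySem.Chars.lowerChar).filter PySem.Chars.isalnum

-- structural description of B's scanner output, with a pending word

def pvG (cur : List Char) : List Char → List (List Char)
  | [] => if cur = [] then [] else [cur]
  | c :: t =>
    if pvSep c then (if cur = [] then pvG [] t else cur :: pvG [] t)
    else pvG (cur ++ if PySem.Chars.isalnum (PySem.Chars.lowerChar c)
                     then [PySem.Chars.lowerChar c] else []) t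

theorem pv_sep_iff (c : Char) :
    (c = '_' ∨ c = '-' ∨ PySem.Chars.isspace c) ↔ pvSep c = true := by
  unfold pvSep
  simp
  tauto

theorem pv_scan_G (s : List Char) :
    ∀ (ws : List (List Char)) (cur : List Char),
    (let st := s.foldl pvScanStep (ws, cur);
     if st.2 = [] then st.1 else st.1 ++ [st.2]) = ws ++ pvG cur s := by
  induction s with
  | nil =>
    intro ws cur
    by_cases h : cur = [] <;> simp [pvG, h]
  | cons c t ih =>
    intro ws cur
    simp only [List.foldl_cons]
    rw [pvG]
    by_cases hs : c = '_' ∨ c = '-' ∨ PySem.Chars.isspace c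
    · rw [if_pos ((pv_sep_iff c).mp hs)]
      by_cases h : cur = []
      · have hstep : pvScanStep (ws, cur) c = (ws, cur) := by
          simp [pvScanStep, hs, h]
        rw [hstep, if_pos h, ih ws cur, h]
      · have hstep : pvScanStep (ws, cur) c = (ws ++ [cur], []) := by
          simp [pvScanStep, hs, h]
        rw [hstep, if_neg h]
        simpa using ih (ws ++ [cur]) []
    · rw [if_neg (show ¬ pvSep c = true from by rw [← pv_sep_iff]; exact hs)]
      by_cases ha : PySem.Chars.isalnum (PySem.Chars.lowerChar c) = true
      · have hstep : pvScanStep (ws, cur) c = (ws, cur ++ [PySem.Chars.lowerChar c]) := by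
          simp [pvScanStep, hs, ha]
        rw [hstep, if_pos ha]
        exact ih ws (cur ++ [PySem.Chars.lowerChar c])
      · have hstep : pvScanStep (ws, cur) c = (ws, cur) := by
          simp [pvScanStep, hs, ha]
        rw [hstep, if_neg ha]
        simpa using ih ws cur

theorem pv_words_take (p : Char → Bool) (t : List Char) :
    pvWords p t
      = (if t.takeWhile (fun d => !p d) = []
         then pvWords p (t.dropWhile (fun d => !p d))
         else (t.takeWhile (fun d => !p d)) :: pvWords p (t.dropWhile (fun d => !p d))) := by
  cases t with
  | nil => simp [pvWords]
  | cons c t' =>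
    by_cases hc : p c = true
    · rw [pvWords, if_pos hc, List.takeWhile_cons_of_neg (by simp [hc]),
          List.dropWhile_cons_of_neg (by simp [hc])]
      simp [pvWords, hc]
    · rw [pvWords, if_neg hc, List.takeWhile_cons_of_pos (by simp [hc]),
          List.dropWhile_cons_of_pos (by simp [hc])]
      simp

theorem pv_filter_words (t : List Char) :
    ((pvg (t.takeWhile (fun d => !pvSep d)))
        :: (pvWords pvSep (t.dropWhile (fun d => !pvSep d))).map pvg).filter (· ≠ [])
      = ((pvWords pvSep t).map pvg).filter (· ≠ []) := by
  rw [pv_words_take pvSep t]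
  by_cases h : t.takeWhile (fun d => !pvSep d) = []
  · rw [if_pos h, h]
    simp [pvg]
  · rw [if_neg h]
    simp

theorem pv_G_H (s : List Char) :
    ∀ (cur : List Char),
    pvG cur s
      = ((cur ++ pvg (s.takeWhile (fun d => !pvSep d)))
          :: (pvWords pvSep (s.dropWhile (fun d => !pvSep d))).map pvg).filter (· ≠ []) := by
  induction s with
  | nil =>
    intro cur
    by_cases h : cur = [] <;> simp [pvG, pvg, h, pvWords]
  | cons c t ih =>
    intro cur
    rw [pvG]
    by_cases hs : pvSep c = true
    · rw [if_pos hs, List.takeWhile_cons_of_neg (by simp [hs]),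
          List.dropWhile_cons_of_neg (by simp [hs])]
      have hnil : pvG [] t = ((pvWords pvSep (c :: t)).map pvg).filter (· ≠ []) := by
        rw [ih [], List.nil_append, pv_filter_words, pvWords, if_pos hs]
      by_cases h : cur = []
      · rw [if_pos h, hnil, h]
        simp [pvg]
      · rw [if_neg h, hnil]
        rw [pvWords, if_pos hs]
        simp [pvg, h]
    · rw [if_neg hs, ih, List.takeWhile_cons_of_pos (by simp [hs]),
          List.dropWhile_cons_of_pos (by simp [hs])]
      have : pvg (c :: t.takeWhile (fun d => !pvSep d))
          = (if PySem.Chars.isalnum (PySem.Chars.lowerChar c)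
             then [PySem.Chars.lowerChar c] else []) ++ pvg (t.takeWhile (fun d => !pvSep d)) := by
        by_cases ha : PySem.Chars.isalnum (PySem.Chars.lowerChar c) = true <;> simp [pvg, ha]
      rw [this, List.append_assoc]

theorem pv_G_words (s : List Char) :
    pvG [] s = ((pvWords pvSep s).map pvg).filter (· ≠ []) := by
  rw [pv_G_H s [], List.nil_append, pv_filter_words]

def pvStemA (w : List Char) : List Char :=
  if PySem.Chars.endswith w ['s'] && decide (3 < w.length)
  then PySem.Chars.slice w none (some (-1)) else w

def pvStemB (w : List Char) : List Char :=
  if decide (3 < w.length) && PySem.Chars.endswith w ['s']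
  then PySem.Chars.slice w none (some (-1)) else w

theorem pv_stepA_eq (acc : List (List Char)) (t : List Char) :
    pvStepA acc t =
      if t.filter PySem.Chars.isalnum = [] then acc
      else if pvStemA (t.filter PySem.Chars.isalnum) ∈ pvStop then acc
      else acc ++ [pvStemA (t.filter PySem.Chars.isalnum)] := rfl

theorem pv_loopA_eq (tokens : List (List Char)) (acc : List (List Char)) :
    tokens.foldl pvStepA acc
    = acc ++ ((((tokens.map (fun t => t.filter PySem.Chars.isalnum)).filter
        (fun p => p ≠ [])).map pvStemA).filter (fun q => q ∉ pvStop)) := by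
  induction tokens generalizing acc with
  | nil => simp
  | cons t ts ih =>
    rw [List.foldl_cons, pv_stepA_eq]
    by_cases h : t.filter PySem.Chars.isalnum = []
    · rw [if_pos h, ih]
      simp [h]
    · rw [if_neg h]
      by_cases hst : pvStemA (t.filter PySem.Chars.isalnum) ∈ pvStop
      · rw [if_pos hst, ih]
        simp [h, hst]
      · rw [if_neg hst, ih]
        simp [h, hst]

theorem pv_stepB_eq (kept : List (List Char)) (w : List Char) :
    pvKeptStep kept w =
      if pvStemB w ∈ pvStop then kept else kept ++ [pvStemB w] := rfl

theorem pv_loopB_eq (words : List (List Char)) (acc : List (List Char)) :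
    words.foldl pvKeptStep acc
    = acc ++ ((words.map pvStemB).filter (fun q => q ∉ pvStop)) := by
  induction words generalizing acc with
  | nil => simp
  | cons w ws ih =>
    rw [List.foldl_cons, pv_stepB_eq]
    by_cases hst : pvStemB w ∈ pvStop
    · rw [if_pos hst, ih]
      simp [hst]
    · rw [if_neg hst, ih]
      simp [hst]

theorem pv_stem_comm : pvStemA = pvStemB := by
  funext w
  unfold pvStemA pvStemB
  rw [Bool.and_comm]

theorem pv_main (topic : String) : topic_norm_key_py topic = topic_norm_key_py_alt topic := by
  simp only [topic_norm_key_py, topic_norm_key_py_alt]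
  have hrep : PySem.Chars.replace (PySem.Chars.replace topic.toList ['_'] [' ']) ['-'] [' ']
      = topic.toList.map pvSub := by
    rw [pv_replace_single, pv_replace_single, List.map_map]
    congr 1
    funext c
    by_cases h1 : c = '_'
    · simp [Function.comp, pvSub, h1]
    · by_cases h2 : c = '-' <;> simp [Function.comp, pvSub, h1, h2]
  rw [hrep, pv_split₀_eq_words, pv_words_sub]
  set cs := topic.toList with hcs
  have hgood : ∀ w ∈ pvWords pvSep cs, w ≠ [] ∧ ∀ c ∈ w, PySem.Chars.isspace c = false := by
    intro w hw
    have hp := pv_words_prop pvSep cs w hw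
    refine ⟨hp.1, fun c hc => ?_⟩
    have := hp.2 c hc
    unfold pvSep at this
    simp only [Bool.or_eq_false_iff] at this
    exact this.2
  rw [pv_strip_join _ hgood, pv_lower_join]
  have hgood2 : ∀ w ∈ (pvWords pvSep cs).map PySem.Chars.lower,
      w ≠ [] ∧ ∀ c ∈ w, PySem.Chars.isspace c = false := by
    intro w hw
    obtain ⟨v, hv, rfl⟩ := List.mem_map.mp hw
    refine ⟨by simpa [PySem.Chars.lower] using (hgood v hv).1, fun c hc => ?_⟩
    obtain ⟨d, hd, rfl⟩ := List.mem_map.mp hc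
    rw [pv_isspace_lowerChar]
    exact (hgood v hv).2 d hd
  have hB := pv_scan_G cs [] []
  simp only [] at hB
  rw [pv_G_words, List.nil_append] at hB
  rw [hB]
  by_cases hnil : pvWords pvSep cs = []
  · rw [hnil] at hB ⊢
    simp [PySem.Chars.join_nil]
  · obtain ⟨w, rest, hcons⟩ := List.exists_cons_of_ne_nil hnil
    rw [hcons] at hB hgood hgood2 ⊢
    have hjne : PySem.Chars.join [' '] ((w :: rest).map PySem.Chars.lower) ≠ [] := by
      apply pv_join_ne_nil
      simpa [PySem.Chars.lower] using (hgood w (by simp)).1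
    rw [List.map_cons] at hjne ⊢
    rw [if_neg hjne]
    rw [pv_split₀_eq_words,
        pv_words_join (PySem.Chars.lower w :: rest.map PySem.Chars.lower)
          (by simpa using hgood2)]
    rw [pv_loopA_eq, List.nil_append, pv_loopB_eq, List.nil_append]
    have hraw : ((PySem.Chars.lower w :: rest.map PySem.Chars.lower).map
          (fun t => t.filter PySem.Chars.isalnum)).filter (fun p => p ≠ [])
        = ((w :: rest).map pvg).filter (fun x => decide (x ≠ [])) := by
      rw [← List.map_cons, List.map_map]
      rfl
    rw [hraw, pv_stem_comm]

-- ===== VERDICT (by name: the statement is the Claim_ definition above) =====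
theorem topic_norm_key_py_spec : Claim_equal_topic_norm_key_py := by
  intro topic _
  show topic_norm_key_py topic = topic_norm_key_py_alt topic
  exact pv_main topic
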